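-- pv_equiv track=rewrite | github.com/ahadx-12/potato-to-bacon | src/potatobacon/api/routes_engineering.py | _normalize_hts_code
-- ===== SOURCE A (Python) =====
-- def _normalize_hts_code(value: str) -> str:
--     digits = "".join(ch for ch in value if ch.isdigit())
--     if len(digits) >= 10:
--         return f"{digits[:4]}.{digits[4:6]}.{digits[6:8]}.{digits[8:10]}"
--     if len(digits) >= 8:
--         return f"{digits[:4]}.{digits[4:6]}.{digits[6:8]}"
--     if len(digits) >= 6:
--         return f"{digits[:4]}.{digits[4:6]}"
--     return digits
-- ===== SOURCE B (Python) =====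
-- def _normalize_hts_code(value: str) -> str:
--     digits = "".join(ch for ch in value if ch.isdigit())
--     if len(digits) < 6:
--         return digits
--     groups = [digits[:4]]
--     rest = digits[4:]
--     while len(rest) >= 2 and len(groups) < 4:
--         groups.append(rest[:2])
--         rest = rest[2:]
--     return ".".join(groups)
-- ===== Notes on version B (the rewrite author's own statement) =====
-- stated objective: alternative
-- what changed: Replaced the four-way length-threshold ladder of hand-written f-strings by a greedy consuming loop: take the 4-digit heading, then repeatedly peel 2-digit groups from the remainder until fewer than 2 digits remain or 4 groups exist, and join the accumulated groups.
import Mathlib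
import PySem

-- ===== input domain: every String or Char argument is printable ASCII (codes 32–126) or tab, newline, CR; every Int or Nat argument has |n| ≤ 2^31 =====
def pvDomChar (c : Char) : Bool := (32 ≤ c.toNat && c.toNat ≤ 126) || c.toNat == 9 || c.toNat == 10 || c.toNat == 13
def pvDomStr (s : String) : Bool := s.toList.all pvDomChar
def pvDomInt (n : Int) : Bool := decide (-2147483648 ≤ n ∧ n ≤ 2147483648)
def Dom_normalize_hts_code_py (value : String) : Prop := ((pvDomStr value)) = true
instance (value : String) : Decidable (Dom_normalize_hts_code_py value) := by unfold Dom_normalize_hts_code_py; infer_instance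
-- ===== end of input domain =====

-- B replaces A's four-way if/elif ladder by a greedy loop that peels 2-digit groups off the remainder (objective: alternative).

-- ===== PORT A =====
def normalize_hts_code_py (value : String) : String :=
  let digits := value.toList.filter (fun ch => PySem.Chars.isdigit ch)
  if digits.length ≥ 10 then
    String.ofList (PySem.List.slice digits none (some 4) ++ '.' ::
      (PySem.List.slice digits (some 4) (some 6) ++ '.' ::
        (PySem.List.slice digits (some 6) (some 8) ++ '.' ::
          PySem.List.slice digits (some 8) (some 10))))
  else if digits.length ≥ 8 then
    String.ofList (PySem.List.slice digits none (some 4) ++ '.' ::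
      (PySem.List.slice digits (some 4) (some 6) ++ '.' ::
        PySem.List.slice digits (some 6) (some 8)))
  else if digits.length ≥ 6 then
    String.ofList (PySem.List.slice digits none (some 4) ++ '.' ::
      PySem.List.slice digits (some 4) (some 6))
  else
    String.ofList digits

-- ===== PORT B =====
-- the while loop of Source B: peel 2-char groups off `rest` while ≥ 2 chars remain and fewer than 4 groups exist
def htsGroupsAux (rest : List Char) (groups : List (List Char)) : List (List Char) :=
  if 2 ≤ rest.length ∧ groups.length < 4 then
    htsGroupsAux (rest.drop 2) (groups ++ [rest.take 2])
  else groups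
termination_by rest.length
decreasing_by simp; omega

def normalize_hts_code_py_alt (value : String) : String :=
  let digits := value.toList.filter (fun ch => PySem.Chars.isdigit ch)
  if digits.length < 6 then String.ofList digits
  else String.ofList (PySem.Chars.join ['.'] (htsGroupsAux (digits.drop 4) [digits.take 4]))

-- ===== PRECONDITION & SPEC =====
def Spec_normalize_hts_code_py (value : String) (out : String) : Prop := out = normalize_hts_code_py_alt value
instance (value : String) (out : String) : Decidable (Spec_normalize_hts_code_py value out) := by unfold Spec_normalize_hts_code_py; infer_instance

-- ===== CLAIM (what is proved, stated in full; the proofs are below) =====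
def Claim_equal_normalize_hts_code_py : Prop := ∀ (value : String), Dom_normalize_hts_code_py value → Spec_normalize_hts_code_py value (normalize_hts_code_py value)

-- ===== LEMMAS AND PROOFS =====

-- Both ports start from the same digit list; agreement is a fact about that list alone.
lemma fmt_eq (d : List Char) :
    (if d.length ≥ 10 then
      String.ofList (PySem.List.slice d none (some 4) ++ '.' ::
        (PySem.List.slice d (some 4) (some 6) ++ '.' ::
          (PySem.List.slice d (some 6) (some 8) ++ '.' ::
            PySem.List.slice d (some 8) (some 10))))
    else if d.length ≥ 8 then
      String.ofList (PySem.List.slice d none (some 4) ++ '.' ::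
        (PySem.List.slice d (some 4) (some 6) ++ '.' ::
          PySem.List.slice d (some 6) (some 8)))
    else if d.length ≥ 6 then
      String.ofList (PySem.List.slice d none (some 4) ++ '.' ::
        PySem.List.slice d (some 4) (some 6))
    else String.ofList d)
    =
    (if d.length < 6 then String.ofList d
     else String.ofList (PySem.Chars.join ['.'] (htsGroupsAux (d.drop 4) [d.take 4]))) := by
  have s04 : PySem.List.slice d none (some 4) = d.take 4 :=
    PySem.List.slice_to d (by norm_num)
  have s46 : PySem.List.slice d (some 4) (some 6) = (d.drop 4).take 2 := by
    rw [PySem.List.slice_toNat d (by norm_num) (by norm_num)]; rfl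
  have s68 : PySem.List.slice d (some 6) (some 8) = (d.drop 6).take 2 := by
    rw [PySem.List.slice_toNat d (by norm_num) (by norm_num)]; rfl
  have s810 : PySem.List.slice d (some 8) (some 10) = (d.drop 8).take 2 := by
    rw [PySem.List.slice_toNat d (by norm_num) (by norm_num)]; rfl
  have dd6 : (d.drop 4).drop 2 = d.drop 6 := by simp
  have dd8 : (d.drop 6).drop 2 = d.drop 8 := by simp
  by_cases h10 : d.length ≥ 10
  · have hloop : htsGroupsAux (d.drop 4) [d.take 4]
        = [d.take 4, (d.drop 4).take 2, (d.drop 6).take 2, (d.drop 8).take 2] := by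
      rw [htsGroupsAux, if_pos ⟨by simp; omega, by simp⟩, dd6,
          htsGroupsAux, if_pos ⟨by simp; omega, by simp⟩, dd8,
          htsGroupsAux, if_pos ⟨by simp; omega, by simp⟩,
          htsGroupsAux, if_neg (by simp)]
      simp
    rw [if_pos h10, if_neg (by omega : ¬ d.length < 6), hloop]
    refine congrArg String.ofList ?_
    simp [s04, s46, s68, s810, PySem.Chars.join, List.intercalate]
  · by_cases h8 : d.length ≥ 8
    · have hloop : htsGroupsAux (d.drop 4) [d.take 4]
          = [d.take 4, (d.drop 4).take 2, (d.drop 6).take 2] := by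
        rw [htsGroupsAux, if_pos ⟨by simp; omega, by simp⟩, dd6,
            htsGroupsAux, if_pos ⟨by simp; omega, by simp⟩, dd8,
            htsGroupsAux, if_neg (by simp; omega)]
        simp
      rw [if_neg h10, if_pos h8, if_neg (by omega : ¬ d.length < 6), hloop]
      refine congrArg String.ofList ?_
      simp [s04, s46, s68, PySem.Chars.join, List.intercalate]
    · by_cases h6 : d.length ≥ 6
      · have hloop : htsGroupsAux (d.drop 4) [d.take 4]
            = [d.take 4, (d.drop 4).take 2] := by
          rw [htsGroupsAux, if_pos ⟨by simp; omega, by simp⟩, dd6,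
              htsGroupsAux, if_neg (by simp; omega)]
          simp
        rw [if_neg h10, if_neg h8, if_pos h6, if_neg (by omega : ¬ d.length < 6), hloop]
        refine congrArg String.ofList ?_
        simp [s04, s46, PySem.Chars.join, List.intercalate]
      · rw [if_neg h10, if_neg h8, if_neg h6, if_pos (by omega : d.length < 6)]

-- ===== VERDICT (by name: the statement is the Claim_ definition above) =====
theorem normalize_hts_code_py_spec : Claim_equal_normalize_hts_code_py := by
  intro value _
  unfold Spec_normalize_hts_code_py normalize_hts_code_py normalize_hts_code_py_alt
  exact fmt_eq _
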